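-- pv_equiv track=rewrite | github.com/dsweet99/dryer | tests/benchmark_data/module_001.py | compute_1_14
-- ===== SOURCE A (Python) =====
-- def compute_1_14(a, b, c):
--     x = a * 60 + b * 113
--     y = c * 84 - a * 165
--     for i in range(20):
--         x = x + i * 18
--         y = y - i * 30
--         if x > 5240:
--             x = x % 1120
--     return x + y + 15
-- ===== SOURCE B (Python) =====
-- def compute_1_14(a, b, c):
--     # Closed form: y is a separate linear accumulation (the loop subtracts
--     # 30*(0+...+19) = 5700).  For x, the running value before any mod at step i
--     # is x0 + 18*(0+1+...+i) = x0 + 9*i*(i+1), which is increasing in i, and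
--     # once the mod fires x drops below 1120 and can never reach 5240 again
--     # (1119 + 18*190 = 4539), so the mod fires at most once: at the least i
--     # with x0 + 9*i*(i+1) > 5240.  Binary-search that index, then finish x in
--     # closed form too.
--     x0 = a * 60 + b * 113
--     lo, hi = 0, 20
--     while lo < hi:
--         mid = (lo + hi) // 2
--         if x0 + 9 * mid * (mid + 1) > 5240:
--             hi = mid
--         else:
--             lo = mid + 1
--     if lo < 20:
--         x = (x0 + 9 * lo * (lo + 1)) % 1120 + 3420 - 9 * lo * (lo + 1)
--     else:
--         x = x0 + 3420
--     return x + (c * 84 - a * 165 - 5700) + 15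
-- ===== Notes on version B (the rewrite author's own statement) =====
-- stated objective: alternative
-- what changed: B replaces the 20-step state-updating loop entirely: it proves the mod can fire at most once (after it, x < 1120 and can never reach 5240 again), binary-searches the least step i with x0 + 9*i*(i+1) > 5240, and computes x and y by closed forms around that single event.
import Mathlib
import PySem

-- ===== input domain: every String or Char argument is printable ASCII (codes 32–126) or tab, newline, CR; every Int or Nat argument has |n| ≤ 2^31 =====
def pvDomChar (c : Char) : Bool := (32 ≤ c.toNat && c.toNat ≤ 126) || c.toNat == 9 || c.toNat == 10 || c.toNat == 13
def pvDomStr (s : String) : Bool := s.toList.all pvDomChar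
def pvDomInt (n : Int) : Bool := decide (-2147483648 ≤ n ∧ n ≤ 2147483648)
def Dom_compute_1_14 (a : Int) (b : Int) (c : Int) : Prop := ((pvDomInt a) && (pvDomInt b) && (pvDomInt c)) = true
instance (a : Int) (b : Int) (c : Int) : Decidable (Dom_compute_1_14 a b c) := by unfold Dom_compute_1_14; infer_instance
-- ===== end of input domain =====

-- B: the mod can fire at most once, so binary-search the unique step where it fires and
-- compute both accumulators by closed forms — a different algorithm, not the 20-step update.

-- ===== PORT A =====
-- one loop body step of A: updates the pair (x, y)
def pvStepA (s : Int × Int) (i : Int) : Int × Int :=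
  let x := s.1 + i * 18
  let y := s.2 - i * 30
  if x > 5240 then (PySem.Int.mod x 1120, y) else (x, y)

def compute_1_14 (a : Int) (b : Int) (c : Int) : Int :=
  let s := (PySem.List.pyRange 0 20 1).foldl pvStepA (a * 60 + b * 113, c * 84 - a * 165)
  s.1 + s.2 + 15

-- ===== PORT B =====
-- the while-loop of Source B: binary search for the least i in [lo,hi) with x0 + 9*i*(i+1) > 5240
def pvBSearch (x0 : Int) (lo : Int) (hi : Int) : Int :=
  if h : lo < hi then
    let mid := PySem.Int.floordiv (lo + hi) 2
    if x0 + 9 * mid * (mid + 1) > 5240 then pvBSearch x0 lo mid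
    else pvBSearch x0 (mid + 1) hi
  else lo
termination_by (hi - lo).toNat
decreasing_by
  all_goals
    have h2 : PySem.Int.floordiv (lo + hi) 2 = (lo + hi) / 2 :=
      PySem.Int.floordiv_eq_ediv_of_pos (by omega)
  · simp only [h2]; omega
  · simp only [h2]; omega

def compute_1_14_alt (a : Int) (b : Int) (c : Int) : Int :=
  let x0 := a * 60 + b * 113
  let k := pvBSearch x0 0 20
  let x := if k < 20 then PySem.Int.mod (x0 + 9 * k * (k + 1)) 1120 + 3420 - 9 * k * (k + 1)
           else x0 + 3420
  x + (c * 84 - a * 165 - 5700) + 15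

-- ===== PRECONDITION & SPEC =====
def Spec_compute_1_14 (a : Int) (b : Int) (c : Int) (out : Int) : Prop := out = compute_1_14_alt a b c
instance (a : Int) (b : Int) (c : Int) (out : Int) : Decidable (Spec_compute_1_14 a b c out) := by unfold Spec_compute_1_14; infer_instance

-- ===== CLAIM (what is proved, stated in full; the proofs are below) =====
def Claim_equal_compute_1_14 : Prop := ∀ (a : Int) (b : Int) (c : Int), Dom_compute_1_14 a b c → Spec_compute_1_14 a b c (compute_1_14 a b c)

-- ===== LEMMAS AND PROOFS =====
-- proof-only: the x-component of A's loop step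
def pvStepX (x : Int) (i : Int) : Int :=
  let x' := x + i * 18
  if x' > 5240 then PySem.Int.mod x' 1120 else x'

-- A's paired fold = (the x-only fold, y minus 30 times the sum of the steps)
theorem pvFold_pair (l : List Int) (x y : Int) :
    l.foldl pvStepA (x, y) = (l.foldl pvStepX x, y - 30 * l.sum) := by
  induction l generalizing x y with
  | nil => simp
  | cons i t ih =>
      simp only [List.foldl_cons, List.sum_cons, pvStepA, pvStepX]
      split_ifs <;> rw [ih] <;> ring_nf

-- the trigger condition at step i
def pvCond (x0 : Int) (i : Int) : Prop := x0 + 9 * i * (i + 1) > 5240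

theorem pvCond_mono (x0 i j : Int) (h0 : 0 ≤ i) (hij : i ≤ j) (h : pvCond x0 i) : pvCond x0 j := by
  unfold pvCond at *; nlinarith

-- binary-search correctness for the monotone predicate pvCond x0
theorem pvBSearch_spec (x0 : Int) : ∀ n (lo hi : Int), (hi - lo).toNat = n → 0 ≤ lo → lo ≤ hi →
    lo ≤ pvBSearch x0 lo hi ∧ pvBSearch x0 lo hi ≤ hi ∧
    (∀ i, lo ≤ i → i < pvBSearch x0 lo hi → ¬ pvCond x0 i) ∧
    (pvBSearch x0 lo hi < hi → pvCond x0 (pvBSearch x0 lo hi)) := by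
  intro n
  induction n using Nat.strong_induction_on with
  | _ n ih =>
    intro lo hi hn h0 hlh
    rw [pvBSearch]
    by_cases h : lo < hi
    · simp only [dif_pos h]
      have h2 : PySem.Int.floordiv (lo + hi) 2 = (lo + hi) / 2 :=
        PySem.Int.floordiv_eq_ediv_of_pos (by omega)
      set mid := PySem.Int.floordiv (lo + hi) 2 with hmid
      have hb : lo ≤ mid ∧ mid < hi := by omega
      by_cases hc : x0 + 9 * mid * (mid + 1) > 5240
      · simp only [if_pos hc]
        obtain ⟨r1, r2, r3, r4⟩ := ih (mid - lo).toNat (by omega) lo mid rfl h0 (by omega)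
        refine ⟨r1, by omega, r3, fun hr => ?_⟩
        by_cases hr2 : pvBSearch x0 lo mid < mid
        · exact r4 hr2
        · have : pvBSearch x0 lo mid = mid := by omega
          rw [this]; exact hc
      · simp only [if_neg hc]
        obtain ⟨r1, r2, r3, r4⟩ := ih (hi - (mid + 1)).toNat (by omega) (mid + 1) hi rfl (by omega) (by omega)
        refine ⟨by omega, r2, fun i hi1 hi2 => ?_, r4⟩
        by_cases hle : i ≤ mid
        · intro hci; exact hc (pvCond_mono x0 i mid (by omega) hle hci)
        · exact r3 i (by omega) hi2
    · simp only [dif_neg h]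
      exact ⟨le_refl _, by omega, by omega, by omega⟩

-- bounds of Python's % with positive modulus
theorem pvMod_bounds (v : Int) : 0 ≤ PySem.Int.mod v 1120 ∧ PySem.Int.mod v 1120 < 1120 := by
  rw [PySem.Int.mod_eq_emod_of_pos (by omega)]
  exact ⟨Int.emod_nonneg v (by omega), Int.emod_lt_of_pos v (by omega)⟩

-- when the trigger never fires over l, the fold is plain addition
theorem pvFoldX_no_trigger (l : List Int) : ∀ x : Int, (∀ i ∈ l, 0 ≤ i) →
    x + 18 * l.sum ≤ 5240 → l.foldl pvStepX x = x + 18 * l.sum := by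
  induction l with
  | nil => intro x _ _; simp
  | cons i t ih =>
      intro x hpos hsum
      have hts : 0 ≤ t.sum := List.sum_nonneg (fun j hj => hpos j (List.mem_cons_of_mem i hj))
      have hi0 : 0 ≤ i := hpos i List.mem_cons_self
      simp only [List.foldl_cons, List.sum_cons] at *
      rw [pvStepX, if_neg (by omega)]
      rw [ih (x + i * 18) (fun j hj => hpos j (List.mem_cons_of_mem i hj)) (by omega)]
      ring

theorem pvRange_sum (j : Int) (hj0 : 0 ≤ j) (hj : j ≤ 20) :
    18 * (PySem.List.pyRange j 20 1).sum = 3420 - 9 * (j - 1) * j := by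
  obtain ⟨m, rfl⟩ : ∃ m : Nat, j = (m : Int) := ⟨j.toNat, by omega⟩
  have hm : m ≤ 20 := by exact_mod_cast hj
  interval_cases m <;> decide

theorem pvRange_nonneg (j : Int) (hj0 : 0 ≤ j) : ∀ i ∈ PySem.List.pyRange j 20 1, 0 ≤ i := by
  intro i hi
  rw [PySem.List.mem_pyRange_one] at hi
  omega

-- main characterization: the x-fold over [j..19], started at the pre-step-j value, equals B's closed form
theorem pvFoldX_char (x0 : Int) : ∀ n (j : Int), (20 - j).toNat = n → 0 ≤ j → j ≤ 20 →
    (∀ i, 0 ≤ i → i < j → ¬ pvCond x0 i) →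
    (PySem.List.pyRange j 20 1).foldl pvStepX (x0 + 9 * (j - 1) * j) =
      (if pvBSearch x0 0 20 < 20 then
        PySem.Int.mod (x0 + 9 * (pvBSearch x0 0 20) * (pvBSearch x0 0 20 + 1)) 1120
          + 3420 - 9 * (pvBSearch x0 0 20) * (pvBSearch x0 0 20 + 1)
      else x0 + 3420) := by
  obtain ⟨b1, b2, b3, b4⟩ := pvBSearch_spec x0 20 0 20 rfl (by omega) (by omega)
  set r := pvBSearch x0 0 20 with hr
  intro n
  induction n using Nat.strong_induction_on with
  | _ n ih =>
    intro j hn hj0 hj20 hnot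
    by_cases hje : j = 20
    · subst hje
      have hr20 : r = 20 := by
        by_contra hne
        have hrlt : r < 20 := by omega
        exact hnot r b1 hrlt (b4 hrlt)
      rw [PySem.List.pyRange_one_eq_nil (by omega)]
      rw [if_neg (by omega)]
      simp only [List.foldl_nil]; ring
    · have hjlt : j < 20 := by omega
      rw [PySem.List.pyRange_one_cons (by omega), List.foldl_cons]
      by_cases hc : pvCond x0 j
      · -- the mod fires here, exactly once: r = j
        have hrj : r = j := by
          by_contra hne
          by_cases hlt : r < j
          · exact hnot r b1 hlt (b4 (by omega))
          · exact (b3 j (by omega) (by omega)) hc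
        unfold pvCond at hc
        rw [pvStepX]
        rw [if_pos (by ring_nf; ring_nf at hc; omega)]
        have hveq : x0 + 9 * (j - 1) * j + j * 18 = x0 + 9 * j * (j + 1) := by ring
        rw [hveq]
        obtain ⟨m1, m2⟩ := pvMod_bounds (x0 + 9 * j * (j + 1))
        rw [pvFoldX_no_trigger _ _ (pvRange_nonneg (j + 1) (by omega))
            (by have := pvRange_sum (j + 1) (by omega) (by omega); nlinarith)]
        rw [pvRange_sum (j + 1) (by omega) (by omega)]
        rw [if_pos (by omega), hrj]
        ring
      · -- no trigger at j: continue
        unfold pvCond at hc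
        rw [pvStepX, if_neg (by ring_nf; ring_nf at hc; omega)]
        have hveq : x0 + 9 * (j - 1) * j + j * 18 = x0 + 9 * ((j + 1) - 1) * (j + 1) := by ring
        rw [hveq]
        exact ih (20 - (j + 1)).toNat (by omega) (j + 1) rfl (by omega) (by omega)
          (fun i h1 h2 => by
            by_cases hij : i = j
            · subst hij; exact fun hci => hc (by unfold pvCond at hci; omega)
            · exact hnot i h1 (by omega))

-- ===== VERDICT (by name: the statement is the Claim_ definition above) =====
theorem compute_1_14_spec : Claim_equal_compute_1_14 := by
  intro a b c _
  show compute_1_14 a b c = compute_1_14_alt a b c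
  unfold compute_1_14 compute_1_14_alt
  rw [pvFold_pair]
  have hchar := pvFoldX_char (a * 60 + b * 113) 20 0 rfl (by omega) (by omega) (by omega)
  have h00 : a * 60 + b * 113 + 9 * (0 - 1) * 0 = a * 60 + b * 113 := by ring
  rw [h00] at hchar
  simp only [hchar]
  have hsum : (PySem.List.pyRange 0 20 1).sum = 190 := by decide
  rw [hsum]
  split_ifs <;> ring
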